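-- pv_equiv track=rewrite | github.com/Camilo1528/geobusca-territorial | backend/app.py | _split_total_minutes
-- ===== SOURCE A (Python) =====
-- from typing import Dict, List, Optional
--
-- def _split_total_minutes(
--         total_minutes: Optional[int], stop_count: int) -> list[int]:
--     if stop_count <= 1:
--         return []
--     total = int(total_minutes or 0)
--     if total <= 0:
--         return [0] * (stop_count - 1)
--     base = total // (stop_count - 1)
--     extra = total % (stop_count - 1)
--     return [base + (1 if i < extra else 0) for i in range(stop_count - 1)]
-- ===== SOURCE B (Python) =====
-- from typing import Dict, List, Optional
--
-- def _split_total_minutes(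
--         total_minutes: Optional[int], stop_count: int) -> list[int]:
--     # Greedy fair-division peel: each step gives the next stop the ceiling
--     # share of the REMAINING minutes over the REMAINING slots, then recurses
--     # on the remainder.  Ceiling-first makes the distribution front-loaded,
--     # which is exactly A's base/extra split.
--     if stop_count <= 1:
--         return []
--     total = int(total_minutes or 0)
--     if total <= 0:
--         return [0] * (stop_count - 1)
--     out = []
--     remaining = total
--     slots = stop_count - 1
--     while slots > 0:
--         share = -((-remaining) // slots)   # ceil(remaining / slots)
--         out.append(share)
--         remaining -= share
--         slots -= 1
--     return out
-- ===== Notes on version B (the rewrite author's own statement) =====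
-- stated objective: alternative
-- what changed: Replaces the one-shot base/extra divmod with a per-index branch by a greedy peel loop that repeatedly assigns the ceiling share of the remaining minutes over the remaining slots and recurses on the remainder.
import Mathlib
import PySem

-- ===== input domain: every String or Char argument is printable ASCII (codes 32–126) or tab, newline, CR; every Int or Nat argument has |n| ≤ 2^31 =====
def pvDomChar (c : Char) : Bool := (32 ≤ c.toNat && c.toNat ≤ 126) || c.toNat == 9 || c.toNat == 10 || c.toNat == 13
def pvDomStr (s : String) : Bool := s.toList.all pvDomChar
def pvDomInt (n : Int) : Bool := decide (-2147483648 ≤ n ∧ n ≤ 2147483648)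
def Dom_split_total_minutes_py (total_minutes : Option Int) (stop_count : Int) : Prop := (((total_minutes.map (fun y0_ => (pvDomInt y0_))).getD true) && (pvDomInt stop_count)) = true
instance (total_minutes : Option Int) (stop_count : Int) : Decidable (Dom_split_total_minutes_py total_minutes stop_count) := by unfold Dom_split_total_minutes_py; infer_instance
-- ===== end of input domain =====

-- B replaces A's one-shot base/extra divmod comprehension by a greedy peel loop: each step
-- assigns the ceiling share of the remaining minutes over the remaining slots (objective: alternative).

-- ===== PORT A =====
def split_total_minutes_py (total_minutes : Option Int) (stop_count : Int) : List Int :=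
  if stop_count ≤ 1 then []
  else
    let total := total_minutes.getD 0     -- int(total_minutes or 0): None→0, falsy 0→0
    if total ≤ 0 then List.replicate (stop_count - 1).toNat 0
    else
      let base := PySem.Int.floordiv total (stop_count - 1)
      let extra := PySem.Int.mod total (stop_count - 1)
      (PySem.List.pyRange 0 (stop_count - 1) 1).map (fun i => base + (if i < extra then 1 else 0))

-- ===== PORT B =====
-- the while loop of Source B: state (remaining, slots), slots strictly decreasing
def pvPeel : Int → Nat → List Int
  | _, 0 => []
  | remaining, Nat.succ k =>
      let share := -(PySem.Int.floordiv (-remaining) ((k : Int) + 1))   -- ceil(remaining/slots)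
      share :: pvPeel (remaining - share) k

def split_total_minutes_py_alt (total_minutes : Option Int) (stop_count : Int) : List Int :=
  if stop_count ≤ 1 then []
  else
    let total := total_minutes.getD 0
    if total ≤ 0 then List.replicate (stop_count - 1).toNat 0
    else pvPeel total (stop_count - 1).toNat

-- ===== PRECONDITION & SPEC =====
def Spec_split_total_minutes_py (total_minutes : Option Int) (stop_count : Int) (out : List Int) : Prop := out = split_total_minutes_py_alt total_minutes stop_count
instance (total_minutes : Option Int) (stop_count : Int) (out : List Int) : Decidable (Spec_split_total_minutes_py total_minutes stop_count out) := by unfold Spec_split_total_minutes_py; infer_instance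

-- ===== CLAIM (what is proved, stated in full; the proofs are below) =====
def Claim_equal_split_total_minutes_py : Prop := ∀ (total_minutes : Option Int) (stop_count : Int), Dom_split_total_minutes_py total_minutes stop_count → Spec_split_total_minutes_py total_minutes stop_count (split_total_minutes_py total_minutes stop_count)

-- ===== LEMMAS AND PROOFS =====

-- one-step unfolding of the peel loop
theorem pvPeel_succ (r : Int) (k : Nat) :
    pvPeel r (k + 1)
      = (-(PySem.Int.floordiv (-r) ((k : Int) + 1)))
          :: pvPeel (r - -(PySem.Int.floordiv (-r) ((k : Int) + 1))) k := rfl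

-- uniqueness of quotient/remainder for a positive divisor
theorem pvQR (n q rr : Int) (hn : 0 < n) (h0 : 0 ≤ rr) (h1 : rr < n) :
    (n * q + rr) / n = q ∧ (n * q + rr) % n = rr := by
  constructor
  · rw [add_comm, Int.add_mul_ediv_left _ _ (by omega : n ≠ 0),
        Int.ediv_eq_zero_of_lt h0 h1, zero_add]
  · rw [add_comm, Int.add_mul_emod_self_left, Int.emod_eq_of_lt h0 h1]

-- The peel loop produces the front-loaded base/extra distribution, stated via ediv/emod.
theorem pvPeel_eq (k : Nat) : ∀ r : Int, 0 ≤ r →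
    pvPeel r (k + 1)
      = List.replicate (r % ((k : Int) + 1)).toNat (r / ((k : Int) + 1) + 1)
          ++ List.replicate ((k + 1) - (r % ((k : Int) + 1)).toNat) (r / ((k : Int) + 1)) := by
  induction k with
  | zero =>
      intro r hr
      have h1 : PySem.Int.floordiv (-r) 1 = (-r) / 1 := PySem.Int.floordiv_eq_ediv_of_pos one_pos
      simp [pvPeel, h1]
  | succ k ih =>
      intro r hr
      rw [pvPeel_succ]
      simp only [Nat.cast_add, Nat.cast_one]
      have hn : (0 : Int) < (k : Int) + 1 + 1 := by omega
      set b : Int := r / ((k : Int) + 1 + 1) with hb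
      set e : Int := r % ((k : Int) + 1 + 1) with he
      have hrep : ((k : Int) + 1 + 1) * b + e = r := Int.ediv_add_emod r _
      have he0 : 0 ≤ e := Int.emod_nonneg r (by omega)
      have hen : e < (k : Int) + 1 + 1 := Int.emod_lt_of_pos r hn
      have hb0 : 0 ≤ b := Int.ediv_nonneg hr (by omega)
      have hshare : -(PySem.Int.floordiv (-r) ((k : Int) + 1 + 1)) = if e = 0 then b else b + 1 := by
        rw [PySem.Int.floordiv_eq_ediv_of_pos hn]
        split_ifs with hez
        · have h1 : -r = ((k : Int) + 1 + 1) * (-b) + 0 := by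
            have h2 : ((k : Int) + 1 + 1) * (-b) = -(((k : Int) + 1 + 1) * b) := by ring
            omega
          rw [h1, (pvQR _ (-b) 0 hn le_rfl hn).1, neg_neg]
        · have h1 : -r = ((k : Int) + 1 + 1) * (-(b + 1)) + (((k : Int) + 1 + 1) - e) := by
            have h2 : ((k : Int) + 1 + 1) * (-(b + 1))
                = -(((k : Int) + 1 + 1) * b) - ((k : Int) + 1 + 1) := by ring
            omega
          rw [h1, (pvQR _ _ _ hn (by omega) (by omega)).1]
          ring
      rw [hshare]
      by_cases hez : e = 0
      · -- even split: remaining = b * (k+1)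
        have hr'rep : r - b = ((k : Int) + 1) * b + 0 := by
          have h2 : ((k : Int) + 1) * b = ((k : Int) + 1 + 1) * b - b := by ring
          omega
        have h0b : 0 ≤ r - b := by
          have h3 : 0 ≤ ((k : Int) + 1) * b := mul_nonneg (by omega) hb0
          omega
        obtain ⟨hd, hm'⟩ := pvQR ((k : Int) + 1) b 0 (by omega) le_rfl (by omega)
        have hdiv : (r - b) / ((k : Int) + 1) = b := by rw [hr'rep]; exact hd
        have hmod : (r - b) % ((k : Int) + 1) = 0 := by rw [hr'rep]; exact hm'
        have het : e.toNat = 0 := by omega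
        rw [if_pos hez, ih (r - b) h0b, hdiv, hmod]
        simp [hez, het, List.replicate_succ]
      · -- remaining = b * (k+1) + (e - 1)
        have hr'rep : r - (b + 1) = ((k : Int) + 1) * b + (e - 1) := by
          have h2 : ((k : Int) + 1) * b = ((k : Int) + 1 + 1) * b - b := by ring
          omega
        have h0b : 0 ≤ r - (b + 1) := by
          have h3 : 0 ≤ ((k : Int) + 1) * b := mul_nonneg (by omega) hb0
          omega
        obtain ⟨hd, hm'⟩ := pvQR ((k : Int) + 1) b (e - 1) (by omega) (by omega) (by omega)
        have hdiv : (r - (b + 1)) / ((k : Int) + 1) = b := by rw [hr'rep]; exact hd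
        have hmod : (r - (b + 1)) % ((k : Int) + 1) = e - 1 := by rw [hr'rep]; exact hm'
        have het : e.toNat = (e - 1).toNat + 1 := by omega
        rw [if_neg hez, ih (r - (b + 1)) h0b, hdiv, hmod, het]
        have hcnt : (k + 1 + 1) - ((e - 1).toNat + 1) = (k + 1) - (e - 1).toNat := by omega
        rw [hcnt, List.replicate_succ, List.cons_append]

-- A's comprehension over range(slots) equals the same base/extra blocks, elementwise.
theorem blocks_eq (total slots : Int) (hpos : 0 < slots) :
    (PySem.List.pyRange 0 slots 1).map
        (fun i => PySem.Int.floordiv total slots + (if i < PySem.Int.mod total slots then 1 else 0))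
      = List.replicate (PySem.Int.mod total slots).toNat (PySem.Int.floordiv total slots + 1)
          ++ List.replicate (slots.toNat - (PySem.Int.mod total slots).toNat) (PySem.Int.floordiv total slots) := by
  have hmod : PySem.Int.mod total slots = total % slots := PySem.Int.mod_eq_emod_of_pos hpos
  have hlo : 0 ≤ total % slots := Int.emod_nonneg _ (by omega)
  have hhi : total % slots < slots := Int.emod_lt_of_pos _ hpos
  apply List.ext_getElem
  · simp [PySem.List.length_pyRange_one, hmod]
    omega
  · intro i h1 h2
    rw [List.getElem_map, PySem.List.getElem_pyRange_one]
    by_cases hi : i < (PySem.Int.mod total slots).toNat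
    · rw [List.getElem_append_left (by simpa using hi)]
      have hc : (0 : Int) + i < PySem.Int.mod total slots := by
        rw [hmod]; rw [hmod] at hi; omega
      simp only [hc, if_true]
      simp
    · rw [List.getElem_append_right (by simpa using hi)]
      have hc : ¬ ((0 : Int) + i < PySem.Int.mod total slots) := by
        rw [hmod]; rw [hmod] at hi; omega
      simp only [hc, if_false]
      simp

-- ===== VERDICT (by name: the statement is the Claim_ definition above) =====
theorem split_total_minutes_py_spec : Claim_equal_split_total_minutes_py := by
  intro t s _
  unfold Spec_split_total_minutes_py split_total_minutes_py split_total_minutes_py_alt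
  by_cases h1 : s ≤ 1
  · simp [h1]
  · simp only [h1, if_false]
    by_cases h2 : t.getD 0 ≤ 0
    · simp [h2]
    · simp only [h2, if_false]
      set r := t.getD 0 with hr
      have hspos : 0 < s - 1 := by omega
      obtain ⟨k, hk⟩ : ∃ k : Nat, (s - 1).toNat = k + 1 := ⟨(s - 1).toNat - 1, by omega⟩
      have hcast : ((k : Int) + 1) = s - 1 := by omega
      rw [blocks_eq r (s - 1) hspos, hk, pvPeel_eq k r (by omega), hcast,
          PySem.Int.mod_eq_emod_of_pos hspos, PySem.Int.floordiv_eq_ediv_of_pos hspos]
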